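-- pv_equiv track=rewrite | github.com/conner-huf/Leetcode | Problems/Practice-ReturnWinner.py | returnWinner
-- ===== SOURCE A (Python) =====
-- HOME_TEAM_WINS = 1
--
-- def returnWinner(competitions, results):
--     current_best_team = ""
--     scoreboard = { current_best_team: 0 }
--
--     for i, competition in enumerate(competitions):
--
--         home_team, away_team = competition
--         result = results[i]
--         current_winner = home_team if HOME_TEAM_WINS == result else away_team
--         update_scoreboard(current_winner, scoreboard, 3)
--
--         if scoreboard[current_winner] > scoreboard[current_best_team]:
--             current_best_team = current_winner
--
--     return current_best_team
--
-- def update_scoreboard(team, scoreboard, points):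
--     scoreboard[team] = scoreboard.get(team, 0) + points
-- ===== SOURCE B (Python) =====
-- HOME_TEAM_WINS = 1
--
-- def returnWinner(competitions, results):
--     # Pass 0: winner of each match, in order.
--     winners = [home if result == HOME_TEAM_WINS else away
--                for (home, away), result in zip(competitions, results)]
--     # Pass 1: tally each team's total points.
--     totals = {}
--     for team in winners:
--         totals[team] = totals.get(team, 0) + 3
--     target = max((totals[team] for team in winners), default=0)
--     # Pass 2: the first team whose running total reaches the peak wins.
--     running = {}
--     for team in winners:
--         running[team] = running.get(team, 0) + 3
--         if running[team] == target:
--             return team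
--     return ""
-- ===== Notes on version B (the rewrite author's own statement) =====
-- stated objective: alternative
-- what changed: B replaces A's single stateful simulation (dict + running best-team variable updated per match) by a tally/select decomposition: one pass computes each winning team's total, the peak total is taken, and a second pass returns the first team whose running total reaches that peak.
import Mathlib
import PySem

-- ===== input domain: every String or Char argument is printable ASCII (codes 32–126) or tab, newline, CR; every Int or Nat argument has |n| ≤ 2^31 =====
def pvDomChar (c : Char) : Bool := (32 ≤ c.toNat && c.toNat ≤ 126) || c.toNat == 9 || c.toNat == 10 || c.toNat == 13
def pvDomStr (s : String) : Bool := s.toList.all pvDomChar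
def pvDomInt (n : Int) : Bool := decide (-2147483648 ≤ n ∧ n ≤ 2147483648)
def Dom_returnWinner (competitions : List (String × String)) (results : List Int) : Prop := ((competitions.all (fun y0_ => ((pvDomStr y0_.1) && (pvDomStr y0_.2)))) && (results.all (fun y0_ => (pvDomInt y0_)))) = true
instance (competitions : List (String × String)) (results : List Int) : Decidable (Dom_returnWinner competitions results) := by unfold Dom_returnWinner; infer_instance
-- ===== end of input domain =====

-- B replaces A's single stateful simulation (dict + running best-team variable) by a
-- tally/select decomposition: tally totals, take the peak, then return the first team whose
-- running total reaches the peak. Same O(n) cost; objective: alternative structure.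

-- ===== PORT A =====
-- update_scoreboard(team, scoreboard, points)
def pvUpdateScoreboard (team : String) (scoreboard : PySem.Dict String Int) (points : Int) : PySem.Dict String Int :=
  scoreboard.insert team (scoreboard.getD team 0 + points)

-- the 'for i, competition in enumerate(competitions)' loop; state = (scoreboard, current_best_team).
-- On an out-of-range results[i] Python raises IndexError (excluded by Pre_); the port stops there.
def pvALoop (items : List (Int × (String × String))) (results : List Int)
    (scoreboard : PySem.Dict String Int) (best : String) : String :=
  match items with
  | [] => best
  | (i, competition) :: rest =>
    match PySem.List.pyGet? results i with
    | none => best  -- IndexError, outside Pre_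
    | some result =>
      let winner := if (1 : Int) == result then competition.1 else competition.2
      let sb := pvUpdateScoreboard winner scoreboard 3
      if sb.getD winner 0 > sb.getD best 0 then pvALoop rest results sb winner
      else pvALoop rest results sb best

def returnWinner (competitions : List (String × String)) (results : List Int) : String :=
  pvALoop (PySem.List.enumerate competitions 0) results (PySem.Dict.empty.insert "" 0) ""  -- scoreboard = { "": 0 }

-- ===== PORT B =====
-- the winners comprehension
def pvWinners (competitions : List (String × String)) (results : List Int) : List String :=
  (competitions.zip results).map (fun p => if p.2 == (1 : Int) then p.1.1 else p.1.2)

-- the tally loop: totals = {}; for team in winners: totals[team] = totals.get(team, 0) + 3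
def pvTally (ws : List String) : PySem.Dict String Int :=
  ws.foldl (fun d t => d.insert t (d.getD t 0 + 3)) PySem.Dict.empty

-- the second pass: return the first team whose running total equals target
def pvScan (ws : List String) (running : PySem.Dict String Int) (target : Int) : String :=
  match ws with
  | [] => ""
  | t :: ts =>
    let run := running.insert t (running.getD t 0 + 3)
    if run.getD t 0 == target then t else pvScan ts run target

def returnWinner_alt (competitions : List (String × String)) (results : List Int) : String :=
  let winners := pvWinners competitions results
  let totals := pvTally winners
  let target := match PySem.List.max? (winners.map (fun t => totals.getD t 0)) (fun x => x) with
                | none => 0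
                | some m => m
  pvScan winners PySem.Dict.empty target

-- ===== PRECONDITION & SPEC =====
-- Pre_ excludes exactly the inputs where A raises IndexError on results[i]: fewer results than competitions.
def Pre_returnWinner (competitions : List (String × String)) (results : List Int) : Prop :=
  competitions.length ≤ results.length

instance (competitions : List (String × String)) (results : List Int) : Decidable (Pre_returnWinner competitions results) := by unfold Pre_returnWinner; infer_instance

def pvWitness_returnWinner : (List (String × String)) × List Int := ([("a", "b")], [1])

def Spec_returnWinner (competitions : List (String × String)) (results : List Int) (out : String) : Prop := out = returnWinner_alt competitions results
instance (competitions : List (String × String)) (results : List Int) (out : String) : Decidable (Spec_returnWinner competitions results out) := by unfold Spec_returnWinner; infer_instance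

-- ===== CLAIM (what is proved, stated in full; the proofs are below) =====
def Claim_equal_returnWinner : Prop := ∀ (competitions : List (String × String)) (results : List Int), Dom_returnWinner competitions results → Pre_returnWinner competitions results → Spec_returnWinner competitions results (returnWinner competitions results)


-- ===== LEMMAS AND PROOFS =====

-- Pure models over counting functions (String → Int), shared by both ports.
def pvBump (c : String → Int) (t : String) : String → Int :=
  fun x => if x = t then c t + 3 else c x

def pvMA : List String → (String → Int) → String → String
  | [], _, best => best
  | t :: ts, c, best =>
    if pvBump c t t > pvBump c t best then pvMA ts (pvBump c t) t
    else pvMA ts (pvBump c t) best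

def pvMScan : List String → (String → Int) → Int → String
  | [], _, _ => ""
  | t :: ts, c, M => if pvBump c t t = M then t else pvMScan ts (pvBump c t) M

theorem pvBump_getD (d : PySem.Dict String Int) (t x : String) :
    (d.insert t (d.getD t 0 + 3)).getD x 0 = pvBump (fun y => d.getD y 0) t x := by
  simp [PySem.Dict.getD_insert, pvBump]

theorem pvScan_eq_mScan (ws : List String) (d : PySem.Dict String Int) (M : Int) :
    pvScan ws d M = pvMScan ws (fun y => d.getD y 0) M := by
  induction ws generalizing d with
  | nil => rfl
  | cons t ts ih =>
    simp only [pvScan, pvMScan, pvBump_getD, beq_iff_eq]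
    split
    · rfl
    · rw [ih]
      congr 1
      funext x
      exact pvBump_getD d t x

theorem pvALoop_eq_mA (competitions : List (String × String)) (results : List Int) :
    ∀ (s : Nat), s + competitions.length ≤ results.length →
    ∀ (d : PySem.Dict String Int) (best : String),
    pvALoop (PySem.List.enumerate competitions (s : Int)) results d best =
      pvMA ((competitions.zip (results.drop s)).map
              (fun p => if p.2 == (1 : Int) then p.1.1 else p.1.2))
           (fun y => d.getD y 0) best := by
  induction competitions with
  | nil => intro s _ d best; simp [PySem.List.enumerate_nil, pvALoop, pvMA]
  | cons c cs ih =>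
    intro s hs d best
    have hsl : s < results.length := by simp at hs; omega
    have hget : PySem.List.pyGet? results (s : Int) = some results[s] := by
      rw [PySem.List.pyGet?_natCast]
      exact List.getElem?_eq_getElem hsl
    have hdrop : results.drop s = results[s] :: results.drop (s + 1) :=
      List.drop_eq_getElem_cons hsl
    rw [PySem.List.enumerate_cons, hdrop]
    simp only [pvALoop, hget, List.zip_cons_cons, List.map_cons, pvMA, pvUpdateScoreboard]
    have hwin : (if (1 : Int) == results[s] then c.1 else c.2)
        = (if results[s] == (1 : Int) then c.1 else c.2) := by
      simp only [beq_iff_eq]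
      by_cases h : results[s] = 1
      · simp [h]
      · rw [if_neg (fun h1 => h h1.symm), if_neg h]
    have hcast : ((s : Int) + 1) = ((s + 1 : Nat) : Int) := by push_cast; ring
    rw [hwin, hcast]
    set w := if results[s] == (1 : Int) then c.1 else c.2 with hw
    have hbfun : (fun y => (d.insert w (d.getD w 0 + 3)).getD y 0) = pvBump (fun y => d.getD y 0) w := by
      funext x; exact pvBump_getD d w x
    have hs' : (s + 1) + cs.length ≤ results.length := by simp at hs; omega
    rw [pvBump_getD, pvBump_getD]
    split
    · rw [ih (s + 1) hs' (d.insert w (d.getD w 0 + 3)) w, hbfun]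
    · rw [ih (s + 1) hs' (d.insert w (d.getD w 0 + 3)) best, hbfun]

-- totals lookup: after the tally loop the dict holds 3 * count
theorem pvTally_getD (ws : List String) :
    ∀ (d : PySem.Dict String Int) (t : String),
    (ws.foldl (fun d t => d.insert t (d.getD t 0 + 3)) d).getD t 0
      = d.getD t 0 + 3 * (ws.count t : Int) := by
  induction ws with
  | nil => intro d t; simp
  | cons x xs ih =>
    intro d t
    simp only [List.foldl_cons, ih, PySem.Dict.getD_insert]
    by_cases h : t = x
    · subst h
      simp only [List.count_cons_self]
      push_cast
      ring
    · rw [if_neg h]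
      have h' : ¬x = t := fun h1 => h h1.symm
      simp [h']

theorem pvBump_count (c : String → Int) (t x : String) (ts : List String) :
    pvBump c t x + 3 * (ts.count x : Int) = c x + 3 * ((t :: ts).count x : Int) := by
  by_cases h : x = t
  · subst h
    simp only [pvBump, List.count_cons_self]
    push_cast
    ring
  · have h' : ¬t = x := fun h1 => h h1.symm
    simp [pvBump, h, h']

theorem pvBump_self (c : String → Int) (t : String) : pvBump c t t = c t + 3 := by
  simp [pvBump]

theorem pvBump_ne (c : String → Int) (t x : String) (h : x ≠ t) : pvBump c t x = c x := by
  simp [pvBump, h]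

-- Once no team can ever exceed the best's score, A's loop never changes best.
theorem pvMA_stop (ws : List String) :
    ∀ (c : String → Int) (best : String),
    (∀ x, c x + 3 * (ws.count x : Int) ≤ c best) →
    pvMA ws c best = best := by
  induction ws with
  | nil => intro c best _; rfl
  | cons t ts ih =>
    intro c best h
    have hcnt : (1 : Int) ≤ ((t :: ts).count t : Int) := by
      have := List.count_pos_iff.mpr (List.mem_cons_self (l := ts) (a := t))
      exact_mod_cast this
    have hbb : c best ≤ pvBump c t best := by
      by_cases hb : best = t
      · subst hb; rw [pvBump_self]; omega
      · rw [pvBump_ne c t best hb]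
    have hnot : ¬ pvBump c t t > pvBump c t best := by
      have h1 := h t
      rw [pvBump_self]
      omega
    rw [pvMA, if_neg hnot]
    apply ih
    intro x
    rw [pvBump_count]
    exact le_trans (h x) hbb

-- Core: A's simulation returns the first team whose running total reaches the peak M.
theorem pvMA_eq_mScan (ws : List String) :
    ∀ (c : String → Int) (best : String) (M : Int),
    (∀ x, c x < M) →
    (∀ x, c x + 3 * (ws.count x : Int) ≤ M) →
    (∃ x, M ≤ c x + 3 * (ws.count x : Int)) →
    pvMA ws c best = pvMScan ws c M := by
  induction ws with
  | nil =>
    intro c best M hlt _ hreach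
    obtain ⟨x, hx⟩ := hreach
    have := hlt x
    simp at hx
    omega
  | cons t ts ih =>
    intro c best M hlt htot hreach
    have hcnt : (1 : Int) ≤ ((t :: ts).count t : Int) := by
      have := List.count_pos_iff.mpr (List.mem_cons_self (l := ts) (a := t))
      exact_mod_cast this
    have hle : pvBump c t t ≤ M := by
      have := htot t
      rw [pvBump_self]
      omega
    by_cases hM : pvBump c t t = M
    · -- the head reaches the peak: A locks onto t, B returns t
      rw [pvMScan, if_pos hM, pvMA]
      have hstop : ∀ x, pvBump c t x + 3 * (ts.count x : Int) ≤ pvBump c t t := by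
        intro x
        rw [pvBump_count, hM]
        exact htot x
      by_cases hb : best = t
      · subst hb
        rw [if_neg (lt_irrefl _)]
        exact pvMA_stop ts _ best hstop
      · have hcond : pvBump c t t > pvBump c t best := by
          have h1 := hlt best
          rw [pvBump_self] at hM ⊢
          rw [pvBump_ne c t best hb]
          omega
        rw [if_pos hcond]
        exact pvMA_stop ts _ t hstop
    · -- peak not reached yet: both recurse in lockstep
      have hlt' : ∀ x, pvBump c t x < M := by
        intro x
        by_cases hx : x = t
        · subst hx; omega
        · rw [pvBump_ne c t x hx]; exact hlt x
      have htot' : ∀ x, pvBump c t x + 3 * (ts.count x : Int) ≤ M := by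
        intro x; rw [pvBump_count]; exact htot x
      have hreach' : ∃ x, M ≤ pvBump c t x + 3 * (ts.count x : Int) := by
        obtain ⟨x, hx⟩ := hreach
        refine ⟨x, ?_⟩
        rw [pvBump_count]
        exact hx
      rw [pvMScan, if_neg hM, pvMA]
      split
      · exact ih _ _ M hlt' htot' hreach'
      · exact ih _ _ M hlt' htot' hreach'

theorem pvSeed_getD (x : String) : ((PySem.Dict.empty.insert "" (0 : Int)).getD x 0) = 0 := by
  rw [PySem.Dict.getD_insert]
  split <;> simp

-- ===== VERDICT (by name: the statement is the Claim_ definition above) =====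
theorem returnWinner_spec : Claim_equal_returnWinner := by
  intro competitions results _ hpre
  unfold Spec_returnWinner returnWinner returnWinner_alt
  have hA := pvALoop_eq_mA competitions results 0 (by simpa using hpre)
      (PySem.Dict.empty.insert "" 0) ""
  simp only [Nat.cast_zero, List.drop_zero] at hA
  rw [hA]
  have hwseq : (competitions.zip results).map
      (fun p => if p.2 == (1 : Int) then p.1.1 else p.1.2) = pvWinners competitions results := rfl
  rw [hwseq]
  have hseed : (fun y => ((PySem.Dict.empty.insert "" (0 : Int)).getD y 0)) = (fun _ => (0 : Int)) := by
    funext x; exact pvSeed_getD x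
  rw [hseed]
  set ws := pvWinners competitions results with hws
  rw [pvScan_eq_mScan]
  have hempty : (fun y => (PySem.Dict.empty (κ := String) (ν := Int)).getD y 0) = (fun _ => (0 : Int)) := by
    funext x; simp
  rw [hempty]
  have htget : ∀ t, (pvTally ws).getD t 0 = 3 * (ws.count t : Int) := by
    intro t
    unfold pvTally
    rw [pvTally_getD]
    simp
  by_cases hnil : ws = []
  · rw [hnil]
    simp [pvMA, pvMScan]
  · have hmax : ∃ m, PySem.List.max? (ws.map (fun t => (pvTally ws).getD t 0)) (fun x => x) = some m := by
      rcases hm : PySem.List.max? (ws.map (fun t => (pvTally ws).getD t 0)) (fun x => x) with _ | m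
      · rw [PySem.List.max?_eq_none_iff, List.map_eq_nil_iff] at hm
        exact absurd hm hnil
      · exact ⟨m, rfl⟩
    obtain ⟨M, hM⟩ := hmax
    have hMred : (match PySem.List.max? (ws.map (fun t => (pvTally ws).getD t 0)) (fun x => x) with
                  | none => (0 : Int) | some m => m) = M := by rw [hM]
    rw [hMred]
    have hmem := PySem.List.max?_mem hM
    have hmax' := PySem.List.max?_isMax hM
    rw [List.mem_map] at hmem
    obtain ⟨t0, ht0, ht0v⟩ := hmem
    rw [htget t0] at ht0v
    have hcnt0 : (1 : Int) ≤ (ws.count t0 : Int) := by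
      have := List.count_pos_iff.mpr ht0
      exact_mod_cast this
    have hMpos : 0 < M := by omega
    apply pvMA_eq_mScan
    · intro _; simpa using hMpos
    · intro x
      by_cases hx : x ∈ ws
      · have hle : (pvTally ws).getD x 0 ≤ M := hmax' _ (List.mem_map.mpr ⟨x, hx, rfl⟩)
        rw [htget x] at hle
        omega
      · have h0 : ws.count x = 0 := List.count_eq_zero.mpr hx
        rw [h0]
        omega
    · exact ⟨t0, by omega⟩
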